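-- pv_equiv track=rewrite | github.com/rebuilder945/FL_research | ast_research/python_code_5.23/lastterm_page7/success_code/杨珂-3225-2023-05-30_23_32_55.py | work
-- ===== SOURCE A (Python) =====
-- def work(a) :
--     dic={0:1}
--     s=1
--     for i in range(1,a+1):
--         for x in range(1,i+1):
--             s=s*x
--         dic[i]=s
--     return dic
-- ===== SOURCE B (Python) =====
-- def work(a):
--     # stage 1: list of factorials 0!..a! (prefix products of 1..a)
--     facts = [1]
--     for i in range(1, a + 1):
--         facts.append(facts[-1] * i)
--     # stage 2: running product of the factorials, written into the dict
--     dic = {}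
--     p = 1
--     for i, f in enumerate(facts):
--         p *= f
--         dic[i] = p
--     return dic
-- ===== Notes on version B (the rewrite author's own statement) =====
-- stated objective: faster
-- what changed: B replaces A's nested loop (recomputing i! from scratch for every i) by two staged linear passes: first a prefix-product list of factorials, then a running product over enumerate(facts) building the dict.
import Mathlib
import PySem

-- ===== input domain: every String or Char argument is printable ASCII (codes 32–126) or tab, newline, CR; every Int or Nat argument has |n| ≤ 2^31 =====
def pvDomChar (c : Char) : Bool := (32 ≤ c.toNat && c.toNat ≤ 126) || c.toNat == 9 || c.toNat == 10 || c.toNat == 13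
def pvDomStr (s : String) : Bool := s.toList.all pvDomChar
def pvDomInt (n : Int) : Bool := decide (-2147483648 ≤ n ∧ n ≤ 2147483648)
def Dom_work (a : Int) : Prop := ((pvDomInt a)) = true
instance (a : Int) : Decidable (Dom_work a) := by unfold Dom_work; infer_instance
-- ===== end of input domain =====

-- B replaces A's nested loop by two staged linear passes (a factorial prefix-product list, then a running product over its enumeration); objective: faster (asymptotically fewer multiplications).


-- ===== PORT A =====
-- dic={0:1}; s=1; for i in range(1,a+1): for x in range(1,i+1): s=s*x; dic[i]=s
def work (a : Int) : List (Int × Int) :=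
  let st := (PySem.List.pyRange 1 (a + 1)).foldl
    (fun (st : PySem.Dict Int Int × Int) i =>
      let s := (PySem.List.pyRange 1 (i + 1)).foldl (fun s x => s * x) st.2
      (st.1.insert i s, s))
    (PySem.Dict.ofList [(0, 1)], 1)
  st.1.items

-- ===== PORT B =====
-- facts=[1]; for i in range(1,a+1): facts.append(facts[-1]*i)
-- dic={}; p=1; for i,f in enumerate(facts): p*=f; dic[i]=p
def work_alt (a : Int) : List (Int × Int) :=
  let facts := (PySem.List.pyRange 1 (a + 1)).foldl
    (fun (fs : List Int) i => fs ++ [((PySem.List.pyGet? fs (-1)).getD 0) * i]) [1]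
  let st := (PySem.List.enumerate facts 0).foldl
    (fun (st : PySem.Dict Int Int × Int) (pr : Int × Int) =>
      let p := st.2 * pr.2
      (st.1.insert pr.1 p, p))
    (PySem.Dict.empty, 1)
  st.1.items

-- ===== PRECONDITION & SPEC =====
def Spec_work (a : Int) (out : List (Int × Int)) : Prop := out = work_alt a
instance (a : Int) (out : List (Int × Int)) : Decidable (Spec_work a out) := by unfold Spec_work; infer_instance

-- ===== CLAIM =====
def Claim_equal_work : Prop := ∀ (a : Int), Dom_work a → Spec_work a (work a)

-- ===== LEMMAS AND PROOFS =====

-- factorial and superfactorial, the values both loops compute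
def pvF : Nat → Int
  | 0 => 1
  | k + 1 => pvF k * ((k : Int) + 1)

def pvS : Nat → Int
  | 0 => 1
  | k + 1 => pvS k * pvF (k + 1)

-- the common closed form of both dictionaries' items after n iterations
def pvItems (n : Nat) : List (Int × Int) :=
  (List.range (n + 1)).map (fun (k : Nat) => ((k : Int), pvS k))

theorem foldl_mul_eq_prod (l : List Int) (s : Int) :
    l.foldl (fun s x => s * x) s = s * l.prod := by
  induction l generalizing s with
  | nil => simp
  | cons x t ih => simp [List.foldl_cons, ih, mul_assoc]

theorem prod_pyRange_eq_pvF (n : Nat) :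
    (PySem.List.pyRange 1 ((n : Int) + 1)).prod = pvF n := by
  induction n with
  | zero => simp [PySem.List.pyRange_one_eq_nil, pvF]
  | succ m ih =>
    have h : ((m + 1 : Nat) : Int) + 1 = ((m : Int) + 1) + 1 := by push_cast; ring
    rw [h, PySem.List.pyRange_one_succ_right (by omega), List.prod_append, ih]
    simp [pvF]

theorem mk_pvItems_not_contains (n : Nat) :
    (PySem.Dict.mk (pvItems n)).contains ((n : Int) + 1) = false := by
  simp only [PySem.Dict.contains_mk, pvItems, List.any_eq_false]
  intro p hp
  simp only [List.mem_map, List.mem_range] at hp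
  obtain ⟨k, hk, rfl⟩ := hp
  intro h
  have : (k : Int) = (n : Int) + 1 := eq_of_beq h
  omega

theorem insert_pvItems (n : Nat) (v : Int) :
    (PySem.Dict.mk (pvItems n)).insert ((n : Int) + 1) v
      = PySem.Dict.mk (pvItems n ++ [(((n : Int) + 1), v)]) := by
  apply PySem.Dict.ext
  rw [PySem.Dict.items_insert_of_not_contains _ _ (mk_pvItems_not_contains n)]

theorem pvItems_succ (n : Nat) :
    pvItems (n + 1) = pvItems n ++ [(((n : Int) + 1), pvS (n + 1))] := by
  simp [pvItems, List.range_succ]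

-- closed form of A's loop state
theorem workA_loop (n : Nat) :
    (PySem.List.pyRange 1 ((n : Int) + 1)).foldl
      (fun (st : PySem.Dict Int Int × Int) i =>
        let s := (PySem.List.pyRange 1 (i + 1)).foldl (fun s x => s * x) st.2
        (st.1.insert i s, s))
      (PySem.Dict.ofList [(0, 1)], 1)
    = (PySem.Dict.mk (pvItems n), pvS n) := by
  induction n with
  | zero =>
    simp [PySem.List.pyRange_one_eq_nil, pvS, pvItems]
    decide
  | succ m ih =>
    have h : ((m + 1 : Nat) : Int) + 1 = ((m : Int) + 1) + 1 := by push_cast; ring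
    rw [h, PySem.List.pyRange_one_succ_right (by omega), List.foldl_append, ih]
    simp only [List.foldl_cons, List.foldl_nil]
    rw [foldl_mul_eq_prod]
    have hm : ((m : Int) + 1) = ((m + 1 : Nat) : Int) := by push_cast; ring
    rw [show (PySem.List.pyRange 1 ((m : Int) + 1 + 1)) = (PySem.List.pyRange 1 (((m + 1 : Nat) : Int) + 1)) by rw [hm],
        prod_pyRange_eq_pvF, insert_pvItems]
    simp [pvItems_succ, pvS]

-- closed form of B's first loop: the factorial list
theorem workB_facts (n : Nat) :
    (PySem.List.pyRange 1 ((n : Int) + 1)).foldl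
      (fun (fs : List Int) i => fs ++ [((PySem.List.pyGet? fs (-1)).getD 0) * i]) [1]
    = (List.range (n + 1)).map (fun k => pvF k) := by
  induction n with
  | zero => simp [PySem.List.pyRange_one_eq_nil, pvF]
  | succ m ih =>
    have h : ((m + 1 : Nat) : Int) + 1 = ((m : Int) + 1) + 1 := by push_cast; ring
    rw [h, PySem.List.pyRange_one_succ_right (by omega), List.foldl_append, ih]
    simp only [List.foldl_cons, List.foldl_nil]
    have hlast : (List.range (m + 1)).map (fun k => pvF k)
        = (List.range m).map (fun k => pvF k) ++ [pvF m] := by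
      simp [List.range_succ]
    rw [hlast, PySem.List.pyGet?_neg_one_append_singleton]
    simp [List.range_succ, pvF]

-- closed form of B's second loop, generalized over a suffix of the factorial list
theorem workB_loop (n : Nat) :
    (PySem.List.enumerate ((List.range (n + 1)).map (fun k => pvF k)) 0).foldl
      (fun (st : PySem.Dict Int Int × Int) (pr : Int × Int) =>
        let p := st.2 * pr.2
        (st.1.insert pr.1 p, p))
      (PySem.Dict.empty, 1)
    = (PySem.Dict.mk (pvItems n), pvS n) := by
  induction n with
  | zero =>
    simp [PySem.List.enumerate, pvF, pvS, pvItems]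
    decide
  | succ m ih =>
    have hlast : (List.range (m + 1 + 1)).map (fun k => pvF k)
        = (List.range (m + 1)).map (fun k => pvF k) ++ [pvF (m + 1)] := by
      simp [List.range_succ]
    rw [hlast, PySem.List.enumerate_append, List.foldl_append, ih]
    simp only [List.foldl_cons, List.foldl_nil, PySem.List.enumerate_cons, PySem.List.enumerate_nil]
    have hlen : ((((List.range (m + 1)).map (fun k => pvF k)).length : Int)) = (m : Int) + 1 := by
      simp
    rw [show ((0 : Int) + (((List.range (m + 1)).map (fun k => pvF k)).length : Int)) = (m : Int) + 1 by rw [hlen]; ring]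
    rw [insert_pvItems]
    simp [pvItems_succ, pvS]

-- ===== VERDICT =====
theorem work_spec : Claim_equal_work := by
  intro a _
  unfold Spec_work work work_alt
  by_cases h : 0 ≤ a
  · obtain ⟨n, rfl⟩ := Int.eq_ofNat_of_zero_le h
    simp only [workA_loop n, workB_facts n, workB_loop n]
  · have hnil : PySem.List.pyRange 1 (a + 1) = [] :=
      PySem.List.pyRange_one_eq_nil (by omega)
    simp [hnil, PySem.List.enumerate]
    decide
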